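-- pv_equiv track=rewrite | github.com/r-dion/MTI | evalpack/utils/affiliation_utils.py | infer_Trange
-- ===== SOURCE A (Python) =====
-- def infer_Trange(events_pred, events_gt):
--     """
--     Given the list of events events_pred and events_gt, get the
--     smallest possible Trange corresponding to the start and stop indexes
--     of the whole series.
--     Trange will not influence the measure of distances, but will impact the
--     measures of probabilities.
--
--     :param events_pred: a list of couples corresponding to predicted events
--     :param events_gt: a list of couples corresponding to ground truth events
--     :return: a couple corresponding to the smallest range containing the events
--     """
--     if len(events_gt) == 0:
--         raise ValueError("The gt events should contain at least one event")
--     if len(events_pred) == 0: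
--         # empty prediction, base Trange only on events_gt (which is non empty)
--         return infer_Trange(events_gt, events_gt)
--
--     min_pred = min([x[0] for x in events_pred])
--     min_gt = min([x[0] for x in events_gt])
--     max_pred = max([x[1] for x in events_pred])
--     max_gt = max([x[1] for x in events_gt])
--     Trange = (min(min_pred, min_gt), max(max_pred, max_gt))
--     return Trange
-- ===== SOURCE B (Python) =====
-- def infer_Trange(events_pred, events_gt):
--     if len(events_gt) == 0:
--         raise ValueError("The gt events should contain at least one event")
--     lo, hi = events_gt[0]
--     for a, b in events_pred + events_gt:
--         if a < lo:
--             lo = a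
--         if b > hi:
--             hi = b
--     return (lo, hi)
-- ===== Notes on version B (the rewrite author's own statement) =====
-- stated objective: simpler
-- what changed: Replaces the four separate list-comprehension min/max reductions and the empty-prediction recursive call with one accumulator loop over the concatenation events_pred + events_gt, seeded from events_gt[0].
import Mathlib
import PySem

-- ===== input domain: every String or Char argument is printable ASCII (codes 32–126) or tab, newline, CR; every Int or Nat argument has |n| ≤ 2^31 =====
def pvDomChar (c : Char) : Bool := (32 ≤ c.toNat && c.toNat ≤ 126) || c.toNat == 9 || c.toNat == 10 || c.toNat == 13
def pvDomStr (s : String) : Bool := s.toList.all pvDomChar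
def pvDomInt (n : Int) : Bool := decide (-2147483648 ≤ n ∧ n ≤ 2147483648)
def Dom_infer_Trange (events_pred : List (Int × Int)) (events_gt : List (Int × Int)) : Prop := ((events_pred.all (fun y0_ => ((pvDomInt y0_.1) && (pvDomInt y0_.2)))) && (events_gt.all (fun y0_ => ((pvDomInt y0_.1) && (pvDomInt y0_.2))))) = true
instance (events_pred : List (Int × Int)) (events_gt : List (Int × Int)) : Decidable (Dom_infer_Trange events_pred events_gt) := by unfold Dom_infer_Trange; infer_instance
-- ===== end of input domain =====

-- B replaces the four per-list min/max reductions and the empty-prediction recursion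
-- with a single accumulator loop over events_pred + events_gt (objective: simpler).

-- ===== PORT A =====
def infer_Trange (events_pred : List (Int × Int)) (events_gt : List (Int × Int)) : Int × Int :=
  if events_gt.length = 0 then
    (0, 0)  -- Python raises ValueError here; excluded by Pre_infer_Trange
  else if events_pred.length = 0 then
    infer_Trange events_gt events_gt
  else
    -- min([...]) / max([...]) on a guaranteed-nonempty list; .getD 0 is unreachable
    let min_pred := (PySem.List.min? (events_pred.map (fun x => x.1)) (fun y => y)).getD 0
    let min_gt := (PySem.List.min? (events_gt.map (fun x => x.1)) (fun y => y)).getD 0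
    let max_pred := (PySem.List.max? (events_pred.map (fun x => x.2)) (fun y => y)).getD 0
    let max_gt := (PySem.List.max? (events_gt.map (fun x => x.2)) (fun y => y)).getD 0
    (min min_pred min_gt, max max_pred max_gt)
termination_by (if events_pred.length = 0 then 1 else 0)
decreasing_by simp_all

-- ===== PORT B =====
def infer_Trange_alt (events_pred : List (Int × Int)) (events_gt : List (Int × Int)) : Int × Int :=
  match events_gt with
  | [] => (0, 0)  -- B raises ValueError here too; excluded by Pre_infer_Trange
  | g :: _ =>
    (events_pred ++ events_gt).foldl
      (fun lh ab => (if ab.1 < lh.1 then ab.1 else lh.1, if ab.2 > lh.2 then ab.2 else lh.2)) g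

-- ===== PRECONDITION & SPEC =====
-- Pre_ excludes exactly events_gt = [], on which Python A (and B) raise ValueError.
def Pre_infer_Trange (events_pred : List (Int × Int)) (events_gt : List (Int × Int)) : Prop :=
  events_gt ≠ []
instance (events_pred : List (Int × Int)) (events_gt : List (Int × Int)) : Decidable (Pre_infer_Trange events_pred events_gt) := by unfold Pre_infer_Trange; infer_instance
def pvWitness_infer_Trange : (List (Int × Int)) × (List (Int × Int)) := ([(0, 5)], [(2, 3)])

def Spec_infer_Trange (events_pred : List (Int × Int)) (events_gt : List (Int × Int)) (out : Int × Int) : Prop := out = infer_Trange_alt events_pred events_gt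
instance (events_pred : List (Int × Int)) (events_gt : List (Int × Int)) (out : Int × Int) : Decidable (Spec_infer_Trange events_pred events_gt out) := by unfold Spec_infer_Trange; infer_instance

-- ===== CLAIM (what is proved, stated in full; the proofs are below) =====
def Claim_equal_infer_Trange : Prop := ∀ (events_pred : List (Int × Int)) (events_gt : List (Int × Int)), Dom_infer_Trange events_pred events_gt → Pre_infer_Trange events_pred events_gt → Spec_infer_Trange events_pred events_gt (infer_Trange events_pred events_gt)

-- ===== LEMMAS AND PROOFS =====

-- running min of first components / max of second components
def pvLo (l : List (Int × Int)) (a : Int) : Int := l.foldl (fun a x => min a x.1) a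
def pvHi (l : List (Int × Int)) (b : Int) : Int := l.foldl (fun b x => max b x.2) b

theorem pvFoldSplit (l : List (Int × Int)) (p : Int × Int) :
    l.foldl (fun lh ab => ((if ab.1 < lh.1 then ab.1 else lh.1 : Int),
        (if ab.2 > lh.2 then ab.2 else lh.2 : Int))) p = (pvLo l p.1, pvHi l p.2) := by
  induction l generalizing p with
  | nil => simp [pvLo, pvHi]
  | cons x t ih =>
    simp only [List.foldl_cons, pvLo, pvHi] at *
    rw [ih]
    congr 1 <;> [skip; skip] <;> congr 1 <;> omega

theorem pvLo_min (l : List (Int × Int)) (a b : Int) :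
    pvLo l (min a b) = min a (pvLo l b) := by
  induction l generalizing b with
  | nil => simp [pvLo]
  | cons x t ih => simp only [pvLo, List.foldl_cons] at *; rw [min_assoc, ih]

theorem pvHi_max (l : List (Int × Int)) (a b : Int) :
    pvHi l (max a b) = max a (pvHi l b) := by
  induction l generalizing b with
  | nil => simp [pvHi]
  | cons x t ih => simp only [pvHi, List.foldl_cons] at *; rw [max_assoc, ih]

theorem pvLo_le (l : List (Int × Int)) (a : Int) : pvLo l a ≤ a := by
  induction l generalizing a with
  | nil => simp [pvLo]
  | cons x t ih =>
    simp only [pvLo, List.foldl_cons] at *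
    exact le_trans (ih _) (min_le_left _ _)

theorem pvHi_ge (l : List (Int × Int)) (a : Int) : a ≤ pvHi l a := by
  induction l generalizing a with
  | nil => simp [pvHi]
  | cons x t ih =>
    simp only [pvHi, List.foldl_cons] at *
    exact le_trans (le_max_left _ _) (ih _)

theorem pvLo_append (l1 l2 : List (Int × Int)) (a : Int) :
    pvLo (l1 ++ l2) a = pvLo l2 (pvLo l1 a) := by
  simp [pvLo, List.foldl_append]

theorem pvHi_append (l1 l2 : List (Int × Int)) (a : Int) :
    pvHi (l1 ++ l2) a = pvHi l2 (pvHi l1 a) := by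
  simp [pvHi, List.foldl_append]

theorem pvLo_cons (x : Int × Int) (t : List (Int × Int)) (a : Int) :
    pvLo (x :: t) a = pvLo t (min a x.1) := rfl

theorem pvHi_cons (x : Int × Int) (t : List (Int × Int)) (a : Int) :
    pvHi (x :: t) a = pvHi t (max a x.2) := rfl

-- closed form of B on nonempty pred / gt
theorem pvAltCons (q : Int × Int) (qs : List (Int × Int)) (g : Int × Int) (gs : List (Int × Int)) :
    infer_Trange_alt (q :: qs) (g :: gs) =
      (min (pvLo qs q.1) (pvLo gs g.1), max (pvHi qs q.2) (pvHi gs g.2)) := by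
  show ((q :: qs) ++ (g :: gs)).foldl _ g = _
  rw [pvFoldSplit]
  congr 1
  · rw [pvLo_append, pvLo_cons, pvLo_cons, pvLo_min, pvLo_min]
    have := pvLo_le gs g.1
    omega
  · rw [pvHi_append, pvHi_cons, pvHi_cons, pvHi_max, pvHi_max]
    have := pvHi_ge gs g.2
    omega

theorem pvMapFoldLo (l : List (Int × Int)) (a : Int) :
    (l.map (fun x => x.1)).foldl min a = pvLo l a := by
  simp [pvLo, List.foldl_map]

theorem pvMapFoldHi (l : List (Int × Int)) (a : Int) :
    (l.map (fun x => x.2)).foldl max a = pvHi l a := by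
  simp [pvHi, List.foldl_map]

-- A on nonempty pred / gt
theorem pvACons (q : Int × Int) (qs : List (Int × Int)) (g : Int × Int) (gs : List (Int × Int)) :
    infer_Trange (q :: qs) (g :: gs) =
      (min (pvLo qs q.1) (pvLo gs g.1), max (pvHi qs q.2) (pvHi gs g.2)) := by
  rw [infer_Trange]
  simp only [List.length_cons, List.map_cons, PySem.List.min?_id_cons, PySem.List.max?_id_cons,
    Option.getD_some, pvMapFoldLo, pvMapFoldHi, if_neg (by omega : ¬(qs.length + 1 = 0)),
    if_neg (by omega : ¬(gs.length + 1 = 0))]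

-- ===== VERDICT (by name: the statement is the Claim_ definition above) =====
theorem infer_Trange_spec : Claim_equal_infer_Trange := by
  intro events_pred events_gt _ hpre
  unfold Spec_infer_Trange
  match events_gt, hpre with
  | g :: gs, _ =>
    match events_pred with
    | q :: qs => rw [pvACons, pvAltCons]
    | [] =>
      rw [infer_Trange]
      simp only [List.length_cons, List.length_nil, if_neg (by omega : ¬(gs.length + 1 = 0))]
      rw [pvACons]
      show _ = ((([] : List (Int × Int)) ++ (g :: gs)).foldl _ g)
      rw [pvFoldSplit, List.nil_append, pvLo_cons, pvHi_cons]
      simp
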